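-- pv_equiv track=rewrite | github.com/Ro-LiT/ets_local | games/game_files/sprites/sprite_remover.py | remove_const_array_from_c
-- ===== SOURCE A (Python) =====
-- def remove_const_array_from_c(lines, var_name):
--     out = []
--     skipping = False
--     brace_depth = 0
--
--     for line in lines:
--         if not skipping:
--             if (
--                 "const" in line
--                 and var_name in line
--                 and "=" in line
--             ):
--                 skipping = True
--                 brace_depth = line.count("{") - line.count("}")
--                 if brace_depth <= 0 and ";" in line:
--                     skipping = False
--                 continue
--             out.append(line)
--         else:
--             brace_depth += line.count("{") - line.count("}")
--             if brace_depth <= 0 and ";" in line: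
--                 skipping = False
--
--     return out
-- ===== SOURCE B (Python) =====
-- def remove_const_array_from_c(lines, var_name):
--     out = []
--     while True:
--         start = next(
--             (i for i, l in enumerate(lines)
--              if "const" in l and var_name in l and "=" in l),
--             None,
--         )
--         if start is None:
--             out.extend(lines)
--             return out
--         out.extend(lines[:start])
--         tail = lines[start:]
--         end = None
--         bal = 0
--         for j, l in enumerate(tail):
--             bal += l.count("{") - l.count("}")
--             if bal <= 0 and ";" in l:
--                 end = j
--                 break
--         lines = tail[end + 1:] if end is not None else []
-- ===== Notes on version B (the rewrite author's own statement) =====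
-- stated objective: alternative
-- what changed: Replaced A's single flag-driven state machine (skipping/brace_depth threaded through one for-loop) with a search-and-splice loop: repeatedly locate the next declaration line with a generator search, locate the block's terminating line by a separate running-balance scan, and splice out that whole segment, keeping the untouched prefix wholesale.
import Mathlib
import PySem

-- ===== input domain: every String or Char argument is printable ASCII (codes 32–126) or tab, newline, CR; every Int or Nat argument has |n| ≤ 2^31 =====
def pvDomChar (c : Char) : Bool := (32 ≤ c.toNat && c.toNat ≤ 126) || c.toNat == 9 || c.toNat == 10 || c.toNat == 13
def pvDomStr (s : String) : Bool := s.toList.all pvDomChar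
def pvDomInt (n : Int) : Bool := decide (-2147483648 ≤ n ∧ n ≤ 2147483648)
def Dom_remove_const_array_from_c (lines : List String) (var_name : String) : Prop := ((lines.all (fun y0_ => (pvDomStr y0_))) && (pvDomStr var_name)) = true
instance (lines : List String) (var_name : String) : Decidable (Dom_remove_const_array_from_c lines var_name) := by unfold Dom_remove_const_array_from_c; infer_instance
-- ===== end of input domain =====

-- B replaces A's flag-driven state machine by a search-and-splice loop (find next declaration,
-- find the block's terminator by a running-balance scan, splice the segment out); same return value.
-- ===== PORT A =====
def pvIsDecl (line v : String) : Bool :=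
  PySem.Str.isIn "const" line && PySem.Str.isIn v line && PySem.Str.isIn "=" line

def pvCnt (line : String) : Int :=
  (PySem.Str.count line "{" : Int) - (PySem.Str.count line "}" : Int)

def pvStepA (v : String) (st : List String × Bool × Int) (line : String) : List String × Bool × Int :=
  let (out, skipping, brace_depth) := st
  if skipping = false then
    if pvIsDecl line v = true then
      let bd := pvCnt line
      if bd ≤ 0 ∧ PySem.Str.isIn ";" line = true then (out, false, bd) else (out, true, bd)
    else (out ++ [line], skipping, brace_depth)
  else
    let bd := brace_depth + pvCnt line
    if bd ≤ 0 ∧ PySem.Str.isIn ";" line = true then (out, false, bd) else (out, true, bd)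

def remove_const_array_from_c (lines : List String) (var_name : String) : List String :=
  (lines.foldl (pvStepA var_name) ([], false, 0)).1

-- ===== PORT B =====
-- Source B's generator search: index of the first declaration line, if any
def pvFindDecl (v : String) : List String → Option Nat
  | [] => none
  | l :: rest => if pvIsDecl l v = true then some 0 else (pvFindDecl v rest).map (· + 1)

-- Source B's running-balance scan over the tail: index of the terminating line, if any
def pvFindEnd : List String → Int → Option Nat
  | [], _ => none
  | l :: rest, bal =>
    let b := bal + pvCnt l
    if b ≤ 0 ∧ PySem.Str.isIn ";" l = true then some 0 else (pvFindEnd rest b).map (· + 1)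

-- Source B's 'tail[end + 1:] if end is not None else []'
def pvSkipRest (ls : List String) (bal : Int) : List String :=
  match pvFindEnd ls bal with
  | some e => ls.drop (e + 1)
  | none => []

theorem pvFindDecl_lt {v : String} : ∀ {ls : List String} {s : Nat},
    pvFindDecl v ls = some s → s < ls.length := by
  intro ls
  induction ls with
  | nil => intro s h; simp [pvFindDecl] at h
  | cons l rest ih =>
    intro s h
    simp only [pvFindDecl] at h
    split at h
    · simp only [Option.some.injEq] at h; subst h; simp
    · cases hr : pvFindDecl v rest with
      | none => rw [hr] at h; simp at h
      | some t =>
        rw [hr] at h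
        simp only [Option.map_some, Option.some.injEq] at h
        subst h
        exact Nat.succ_lt_succ (ih hr)

theorem pvSkipRest_length_lt {ls : List String} (h : ls ≠ []) (bal : Int) :
    (pvSkipRest ls bal).length < ls.length := by
  unfold pvSkipRest
  cases hfe : pvFindEnd ls bal with
  | none => simpa using List.length_pos_of_ne_nil h
  | some e =>
    simp only [List.length_drop]
    have := List.length_pos_of_ne_nil h
    omega

def remove_const_array_from_c_alt (lines : List String) (var_name : String) : List String :=
  match hs : pvFindDecl var_name lines with
  | none => lines
  | some s =>
      lines.take s ++ remove_const_array_from_c_alt (pvSkipRest (lines.drop s) 0) var_name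
termination_by lines.length
decreasing_by
  have hs' : s < lines.length := pvFindDecl_lt hs
  have hne : lines.drop s ≠ [] := by
    intro hnil
    have := congrArg List.length hnil
    simp at this
    omega
  calc (pvSkipRest (lines.drop s) 0).length < (lines.drop s).length := pvSkipRest_length_lt hne 0
    _ ≤ lines.length := by simp

-- ===== PRECONDITION & SPEC =====
def Spec_remove_const_array_from_c (lines : List String) (var_name : String) (out : List String) : Prop := out = remove_const_array_from_c_alt lines var_name
instance (lines : List String) (var_name : String) (out : List String) : Decidable (Spec_remove_const_array_from_c lines var_name out) := by unfold Spec_remove_const_array_from_c; infer_instance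

-- ===== CLAIM (what is proved, stated in full; the proofs are below) =====
def Claim_equal_remove_const_array_from_c : Prop := ∀ (lines : List String) (var_name : String), Dom_remove_const_array_from_c lines var_name → Spec_remove_const_array_from_c lines var_name (remove_const_array_from_c lines var_name)

-- ===== LEMMAS AND PROOFS =====
theorem pvAlt_eq (lines : List String) (v : String) :
    remove_const_array_from_c_alt lines v = (match pvFindDecl v lines with
      | none => lines
      | some s => lines.take s ++ remove_const_array_from_c_alt (pvSkipRest (lines.drop s) 0) v) := by
  rw [remove_const_array_from_c_alt]
  split <;> rename_i hs <;> rw [hs]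

theorem pvAlt_nil (v : String) : remove_const_array_from_c_alt [] v = [] := by
  rw [pvAlt_eq]
  simp [pvFindDecl]

theorem pvSkipRest_cons_term {l : String} {rest : List String} {bal : Int}
    (h : bal + pvCnt l ≤ 0 ∧ PySem.Str.isIn ";" l = true) :
    pvSkipRest (l :: rest) bal = rest := by
  simp only [pvSkipRest, pvFindEnd]
  rw [if_pos h]
  simp

theorem pvSkipRest_cons_open {l : String} {rest : List String} {bal : Int}
    (h : ¬ (bal + pvCnt l ≤ 0 ∧ PySem.Str.isIn ";" l = true)) :
    pvSkipRest (l :: rest) bal = pvSkipRest rest (bal + pvCnt l) := by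
  simp only [pvSkipRest, pvFindEnd, if_neg h]
  cases pvFindEnd rest (bal + pvCnt l) <;> simp

theorem pvAlt_cons_decl {l v : String} {rest : List String} (h : pvIsDecl l v = true) :
    remove_const_array_from_c_alt (l :: rest) v
      = remove_const_array_from_c_alt (pvSkipRest (l :: rest) 0) v := by
  rw [pvAlt_eq]
  simp [pvFindDecl, h]

theorem pvAlt_cons_nondecl {l v : String} {rest : List String} (h : pvIsDecl l v = false) :
    remove_const_array_from_c_alt (l :: rest) v = l :: remove_const_array_from_c_alt rest v := by
  rw [pvAlt_eq (l :: rest) v, pvAlt_eq rest v]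
  cases hr : pvFindDecl v rest with
  | none => simp [pvFindDecl, h, hr]
  | some s => simp [pvFindDecl, h, hr]

theorem pvStepA_skip_decl_term {v line : String} {out : List String} {d : Int}
    (h1 : pvIsDecl line v = true) (h2 : pvCnt line ≤ 0 ∧ PySem.Str.isIn ";" line = true) :
    pvStepA v (out, false, d) line = (out, false, pvCnt line) := by
  simp only [pvStepA, h1, if_true, if_pos h2]

theorem pvStepA_skip_decl_open {v line : String} {out : List String} {d : Int}
    (h1 : pvIsDecl line v = true) (h2 : ¬ (pvCnt line ≤ 0 ∧ PySem.Str.isIn ";" line = true)) :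
    pvStepA v (out, false, d) line = (out, true, pvCnt line) := by
  simp only [pvStepA, h1, if_true, if_neg h2]

theorem pvStepA_skip_plain {v line : String} {out : List String} {d : Int}
    (h1 : pvIsDecl line v = false) :
    pvStepA v (out, false, d) line = (out ++ [line], false, d) := by
  simp [pvStepA, h1]

theorem pvStepA_in_term {v line : String} {out : List String} {d : Int}
    (h2 : d + pvCnt line ≤ 0 ∧ PySem.Str.isIn ";" line = true) :
    pvStepA v (out, true, d) line = (out, false, d + pvCnt line) := by
  simp only [pvStepA, if_neg (by simp : ¬ (true = false)), if_pos h2]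

theorem pvStepA_in_open {v line : String} {out : List String} {d : Int}
    (h2 : ¬ (d + pvCnt line ≤ 0 ∧ PySem.Str.isIn ";" line = true)) :
    pvStepA v (out, true, d) line = (out, true, d + pvCnt line) := by
  simp only [pvStepA, if_neg (by simp : ¬ (true = false)), if_neg h2]

theorem pvMain : ∀ (ls : List String) (v : String),
    (∀ (acc : List String) (d : Int),
      (ls.foldl (pvStepA v) (acc, false, d)).1 = acc ++ remove_const_array_from_c_alt ls v) ∧
    (∀ (acc : List String) (d : Int),
      (ls.foldl (pvStepA v) (acc, true, d)).1
        = acc ++ remove_const_array_from_c_alt (pvSkipRest ls d) v) := by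
  intro ls v
  induction ls with
  | nil =>
    constructor <;> intro acc d <;> simp [pvAlt_nil, pvSkipRest, pvFindEnd]
  | cons line rest ih =>
    constructor
    · intro acc d
      rw [List.foldl_cons]
      by_cases hdecl : pvIsDecl line v = true
      · rw [pvAlt_cons_decl hdecl]
        by_cases hterm : pvCnt line ≤ 0 ∧ PySem.Str.isIn ";" line = true
        · rw [pvStepA_skip_decl_term hdecl hterm,
            pvSkipRest_cons_term (by simpa using hterm)]
          exact ih.1 acc (pvCnt line)
        · rw [pvStepA_skip_decl_open hdecl hterm,
            pvSkipRest_cons_open (by simpa using hterm)]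
          simpa using ih.2 acc (pvCnt line)
      · have hdecl' : pvIsDecl line v = false := Bool.not_eq_true _ ▸ hdecl
        rw [pvAlt_cons_nondecl hdecl', pvStepA_skip_plain hdecl', ih.1 (acc ++ [line]) d]
        simp
    · intro acc d
      rw [List.foldl_cons]
      by_cases hterm : d + pvCnt line ≤ 0 ∧ PySem.Str.isIn ";" line = true
      · rw [pvStepA_in_term hterm, pvSkipRest_cons_term hterm]
        exact ih.1 acc (d + pvCnt line)
      · rw [pvStepA_in_open hterm, pvSkipRest_cons_open hterm]
        exact ih.2 acc (d + pvCnt line)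

-- ===== VERDICT (by name: the statement is the Claim_ definition above) =====
theorem remove_const_array_from_c_spec : Claim_equal_remove_const_array_from_c := by
  intro lines var_name _
  unfold Spec_remove_const_array_from_c remove_const_array_from_c
  simpa using (pvMain lines var_name).1 [] 0
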